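-- pv_equiv track=rewrite | github.com/Mechamod/Galopp-Merger | galopp-preprocessor.py | clean_trainer_name_string
-- ===== SOURCE A (Python) =====
-- def clean_trainer_name_string(x):
--     x = x.replace("'", "")
--     x = x.strip()
--     x = x.lower()
--
--     if "." in x:
--         while "." in x:
--             x = x[x.index(".", )+1:] # Get surname by dot
--     elif len(x.split()) == 2:
--         x = x.split()[1]  # Get surname when both names are in the name string
--     else:
--         x=x
--
--     return x
-- ===== SOURCE B (Python) =====
-- def clean_trainer_name_string(x):
--     x = x.replace("'", "").strip().lower()
--     # single backward scan for the last dot instead of repeated forward rescans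
--     for i in range(len(x) - 1, -1, -1):
--         if x[i] == ".":
--             return x[i+1:]
--     words = x.split()
--     if len(words) == 2:
--         return words[1]
--     return x
-- ===== Notes on version B (the rewrite author's own statement) =====
-- stated objective: alternative
-- what changed: The while-loop that repeatedly finds the first dot and slices past it is replaced by a single backward scan that returns the suffix after the last dot in one pass.
import Mathlib
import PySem

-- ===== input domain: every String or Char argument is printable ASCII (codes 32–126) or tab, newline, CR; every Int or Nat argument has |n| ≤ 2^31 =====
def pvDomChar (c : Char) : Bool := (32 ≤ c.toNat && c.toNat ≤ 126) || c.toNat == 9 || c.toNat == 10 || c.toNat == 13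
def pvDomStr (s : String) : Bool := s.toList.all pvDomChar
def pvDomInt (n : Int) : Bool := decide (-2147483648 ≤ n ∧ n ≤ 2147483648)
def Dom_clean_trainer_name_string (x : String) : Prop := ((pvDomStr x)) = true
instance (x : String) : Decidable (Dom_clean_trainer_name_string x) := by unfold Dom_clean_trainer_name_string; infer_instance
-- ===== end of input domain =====

-- B replaces A's repeated forward find-dot-and-slice loop by one backward scan for the last dot (alternative, single pass).

-- ===== PORT A =====
-- while "." in x: x = x[x.index(".")+1:]   (worked on the char list; under the loop guard
-- x.index(".") = PySem.Chars.find, which is exact there)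
def pvLoopA (l : List Char) : List Char :=
  if h : PySem.Chars.isIn ['.'] l = true then
    pvLoopA (PySem.List.slice l (some (PySem.Chars.find l ['.'] + 1)) none)
  else l
termination_by l.length
decreasing_by
  have hinf : ['.'] <:+: l := (PySem.Chars.isIn_iff_infix _ _).mp h
  have h0 : 0 ≤ PySem.Chars.find l ['.'] := (PySem.Chars.find_nonneg_iff _ _).mpr hinf
  have h1 : (0:Int) ≤ PySem.Chars.find l ['.'] + 1 := by omega
  rw [PySem.List.slice_from _ h1]
  have hlen : 0 < l.length := by
    rcases hinf with ⟨s, t, hst⟩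
    simp [← hst]
  have : 1 ≤ (PySem.Chars.find l ['.'] + 1).toNat := by omega
  simp only [List.length_drop]
  omega

def clean_trainer_name_string (x : String) : String :=
  let x1 := PySem.Str.lower (PySem.Str.strip (PySem.Str.replace x "'" ""))
  if PySem.Str.isIn "." x1 = true then
    String.ofList (pvLoopA x1.toList)
  else if (PySem.Str.split₀ x1).length = 2 then
    (PySem.Str.split₀ x1).getD 1 x1   -- x.split()[1]: index 1 is in range by the guard
  else x1

-- ===== PORT B =====
-- for i in range(len(x)-1, -1, -1): if x[i] == ".": return x[i+1:]   (i always in range,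
-- so x[i] is List.getD; x[i+1:] is the nonnegative slice)
def pvScanB (l : List Char) : Nat → Option (List Char)
  | 0 => none
  | n + 1 =>
    if l.getD n ' ' = '.' then some (PySem.List.slice l (some ((n : Int) + 1)) none)
    else pvScanB l n

def clean_trainer_name_string_alt (x : String) : String :=
  let y := PySem.Str.lower (PySem.Str.strip (PySem.Str.replace x "'" ""))
  match pvScanB y.toList y.toList.length with
  | some t => String.ofList t
  | none =>
    if (PySem.Str.split₀ y).length = 2 then
      (PySem.Str.split₀ y).getD 1 y   -- words[1]: index 1 is in range by the guard
    else y

-- ===== PRECONDITION & SPEC =====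
def Spec_clean_trainer_name_string (x : String) (out : String) : Prop := out = clean_trainer_name_string_alt x
instance (x : String) (out : String) : Decidable (Spec_clean_trainer_name_string x out) := by unfold Spec_clean_trainer_name_string; infer_instance

-- ===== CLAIM (what is proved, stated in full; the proofs are below) =====
def Claim_equal_clean_trainer_name_string : Prop := ∀ (x : String), Dom_clean_trainer_name_string x → Spec_clean_trainer_name_string x (clean_trainer_name_string x)

-- ===== LEMMAS AND PROOFS =====

lemma pv_isIn_iff_mem (l : List Char) : PySem.Chars.isIn ['.'] l = true ↔ '.' ∈ l := by
  rw [PySem.Chars.isIn_iff_infix]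
  constructor
  · intro h; exact List.singleton_sublist.mp h.sublist
  · intro h
    rcases List.append_of_mem h with ⟨s, t, rfl⟩
    exact ⟨s, t, by simp⟩

lemma pv_getD_ne_of_not_mem {l : List Char} (h : '.' ∉ l) {i : Nat} (hi : i < l.length) :
    l.getD i ' ' ≠ '.' := by
  rw [List.getD_eq_getElem l ' ' hi]
  intro hc; exact h (hc ▸ List.getElem_mem hi)

lemma pv_exists_last_dot (l : List Char) (h : '.' ∈ l) :
    ∃ j, j < l.length ∧ l.getD j ' ' = '.' ∧
      ∀ i, j < i → i < l.length → l.getD i ' ' ≠ '.' := by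
  induction l with
  | nil => simp at h
  | cons c t ih =>
    by_cases ht : '.' ∈ t
    · rcases ih ht with ⟨j, hj, hdot, hlast⟩
      refine ⟨j + 1, by simpa using hj, by simpa using hdot, ?_⟩
      intro i hji hi
      cases i with
      | zero => omega
      | succ i' =>
        have := hlast i' (by omega) (by simpa using hi)
        simpa using this
    · have hc : c = '.' := by
        rcases List.mem_cons.mp h with h' | h'
        · exact h'.symm
        · exact absurd h' ht
      refine ⟨0, by simp, by simp [hc], ?_⟩
      intro i hji hi
      cases i with
      | zero => omega
      | succ i' =>
        have : t.getD i' ' ' ≠ '.' := pv_getD_ne_of_not_mem ht (by simpa using hi)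
        simpa using this

lemma pv_getD_drop (l : List Char) (m i : Nat) (h : m + i < l.length) :
    (l.drop m).getD i ' ' = l.getD (m + i) ' ' := by
  have hi : i < (l.drop m).length := by simp [List.length_drop]; omega
  rw [List.getD_eq_getElem _ _ hi, List.getD_eq_getElem _ _ h]
  simp [List.getElem_drop]

lemma pv_loopA_no_dot (l : List Char) (h : '.' ∉ l) : pvLoopA l = l := by
  rw [pvLoopA]
  simp [pv_isIn_iff_mem, h]

lemma pv_prefix_singleton_iff (l : List Char) (i : Nat) (hi : i < l.length) :
    ['.'] <+: l.drop i ↔ l.getD i ' ' = '.' := by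
  rw [List.getD_eq_getElem l ' ' hi]
  constructor
  · rintro ⟨t, ht⟩
    have : (l.drop i).head? = some '.' := by rw [← ht]; rfl
    rw [List.head?_drop] at this
    simpa [List.getElem?_eq_getElem hi] using this
  · intro hget
    have hd : l.drop i = '.' :: l.drop (i + 1) := by
      rw [List.drop_eq_getElem_cons hi, hget]
    exact ⟨l.drop (i + 1), hd.symm⟩

lemma pv_loopA_eq (n : Nat) (l : List Char) (hn : l.length ≤ n) (j : Nat)
    (hj : j < l.length) (hdot : l.getD j ' ' = '.')
    (hlast : ∀ i, j < i → i < l.length → l.getD i ' ' ≠ '.') :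
    pvLoopA l = l.drop (j + 1) := by
  induction n generalizing l j with
  | zero => omega
  | succ n ih =>
    have hmem : '.' ∈ l := by
      rw [List.getD_eq_getElem l ' ' hj] at hdot
      exact hdot ▸ List.getElem_mem hj
    have hisin : PySem.Chars.isIn ['.'] l = true := (pv_isIn_iff_mem l).mpr hmem
    have hinf : ['.'] <:+: l := (PySem.Chars.isIn_iff_infix _ _).mp hisin
    have h0 : 0 ≤ PySem.Chars.find l ['.'] := (PySem.Chars.find_nonneg_iff _ _).mpr hinf
    set f := (PySem.Chars.find l ['.']).toNat with hf
    have hspec := PySem.Chars.find_spec h0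
    have hfj : f ≤ j := by
      by_contra hc
      exact (hspec.2 j (by omega)) ((pv_prefix_singleton_iff l j hj).mpr hdot)
    have hfl : f < l.length := by
      rcases hspec.1 with ⟨t, ht⟩
      have := congrArg List.length ht
      simp [List.length_drop] at this
      omega
    have hstep : pvLoopA l = pvLoopA (l.drop (f + 1)) := by
      rw [pvLoopA]
      simp only [hisin, dite_true]
      congr 1
      rw [PySem.List.slice_from _ (by omega : (0:Int) ≤ PySem.Chars.find l ['.'] + 1)]
      congr 1
      omega
    by_cases hfj' : f = j
    · subst hfj'
      have hnd : '.' ∉ l.drop (f + 1) := by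
        intro hc
        rcases List.mem_iff_getElem.mp hc with ⟨k, hk, hke⟩
        have hk2 : k < l.length - (f + 1) := by simpa using hk
        have hk' : f + 1 + k < l.length := by omega
        refine hlast (f + 1 + k) (by omega) hk' ?_
        rw [List.getD_eq_getElem l ' ' hk']
        rw [List.getElem_drop] at hke
        exact hke
      rw [hstep, pv_loopA_no_dot _ hnd]
    · have hflt : f < j := by omega
      have hjl : j - (f + 1) < (l.drop (f + 1)).length := by
        simp [List.length_drop]; omega
      have hdot' : (l.drop (f + 1)).getD (j - (f + 1)) ' ' = '.' := by
        rw [pv_getD_drop _ _ _ (by omega), show f + 1 + (j - (f + 1)) = j by omega]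
        exact hdot
      have hlast' : ∀ i, j - (f + 1) < i → i < (l.drop (f + 1)).length →
          (l.drop (f + 1)).getD i ' ' ≠ '.' := by
        intro i hji hi
        have hi' : f + 1 + i < l.length := by
          simp [List.length_drop] at hi; omega
        rw [pv_getD_drop _ _ _ hi']
        exact hlast _ (by omega) hi'
      have hlen' : (l.drop (f + 1)).length ≤ n := by
        simp [List.length_drop]; omega
      rw [hstep, ih _ hlen' _ hjl hdot' hlast', List.drop_drop]
      congr 1
      omega

lemma pv_scanB_none (l : List Char) (n : Nat)
    (h : ∀ i, i < n → l.getD i ' ' ≠ '.') : pvScanB l n = none := by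
  induction n with
  | zero => rfl
  | succ n ih =>
    rw [pvScanB]
    simp only [h n (by omega), if_false]
    exact ih fun i hi => h i (by omega)

lemma pv_scanB_some (l : List Char) (j n : Nat) (hjn : j < n)
    (hdot : l.getD j ' ' = '.') (h : ∀ i, j < i → i < n → l.getD i ' ' ≠ '.') :
    pvScanB l n = some (l.drop (j + 1)) := by
  induction n with
  | zero => omega
  | succ n ih =>
    rw [pvScanB]
    by_cases hj : j = n
    · subst hj
      simp only [hdot, if_true]
      congr 1
      rw [show ((j : Int) + 1) = ((j + 1 : Nat) : Int) by push_cast; ring,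
        PySem.List.slice_from_natCast]
    · have : l.getD n ' ' ≠ '.' := h n (by omega) (by omega)
      simp only [this, if_false]
      exact ih (by omega) fun i hji hi => h i hji (by omega)

-- ===== VERDICT (by name: the statement is the Claim_ definition above) =====
theorem clean_trainer_name_string_spec : Claim_equal_clean_trainer_name_string := by
  intro x _
  unfold Spec_clean_trainer_name_string clean_trainer_name_string clean_trainer_name_string_alt
  set y := PySem.Str.lower (PySem.Str.strip (PySem.Str.replace x "'" "")) with hy
  by_cases hmem : '.' ∈ y.toList
  · have hisin : PySem.Str.isIn "." y = true := by
      rw [PySem.Str.isIn_eq]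
      exact (pv_isIn_iff_mem _).mpr (by simpa using hmem)
    rcases pv_exists_last_dot y.toList hmem with ⟨j, hj, hdot, hlast⟩
    simp only [hisin, if_true]
    rw [pv_loopA_eq y.toList.length y.toList le_rfl j hj hdot hlast,
      pv_scanB_some y.toList j y.toList.length hj hdot hlast]
  · have hisin : PySem.Str.isIn "." y = false := by
      rw [PySem.Str.isIn_eq]
      simp only [← Bool.not_eq_true]
      intro hc
      exact hmem (by simpa using (pv_isIn_iff_mem _).mp (by simpa using hc))
    have hnone : pvScanB y.toList y.toList.length = none :=
      pv_scanB_none _ _ fun i hi => pv_getD_ne_of_not_mem hmem hi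
    simp only [hisin, Bool.false_eq_true, if_false, hnone]
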